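-- pv_equiv track=rewrite | github.com/AnasGrzor/DSA | NSL.py | NearestSmallestElement
-- ===== SOURCE A (Python) =====
-- def NearestSmallestElement(arr):
--     vector = []
--     stack = []
--
--     for i in range(len(arr)):
--         if len(stack) == 0:
--             vector.append(-1)
--         elif len(stack) > 0 and stack[0] < arr[i]:
--             vector.append(stack[0])
--         else:
--             while (len(stack) > 0 and stack[0] >= arr[i]):
--                 stack.pop(0)
--             if len(stack) == 0:
--                 vector.append(-1)
--             else:
--                 vector.append(stack[0])
--
--         stack.append(arr[i])
--
--     return vector
-- ===== SOURCE B (Python) =====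
-- def NearestSmallestElement(arr):
--     res = []
--     m = None
--     for x in arr:
--         res.append(m if m is not None and m < x else -1)
--         if m is None or x < m:
--             m = x
--     return res
-- ===== Notes on version B (the rewrite author's own statement) =====
-- stated objective: faster
-- what changed: Replaced the queue with front-pops (stack[0] is always the running minimum, so the while loop only ever empties the whole queue) by a single pass that tracks the running minimum in one variable.
import Mathlib
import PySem

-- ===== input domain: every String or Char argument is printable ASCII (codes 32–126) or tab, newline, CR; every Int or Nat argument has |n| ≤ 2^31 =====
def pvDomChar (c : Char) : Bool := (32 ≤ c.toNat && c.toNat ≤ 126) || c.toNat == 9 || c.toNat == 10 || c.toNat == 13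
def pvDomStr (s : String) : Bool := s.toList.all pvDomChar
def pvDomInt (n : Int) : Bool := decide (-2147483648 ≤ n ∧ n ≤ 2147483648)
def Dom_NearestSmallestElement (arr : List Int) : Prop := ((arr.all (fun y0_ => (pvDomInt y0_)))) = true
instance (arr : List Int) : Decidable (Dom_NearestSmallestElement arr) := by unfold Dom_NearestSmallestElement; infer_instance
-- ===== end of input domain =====

-- B replaces A's queue with front-pops by a single pass tracking the running minimum (asymptotically faster).

-- ===== PORT A =====
-- the inner `while (len(stack) > 0 and stack[0] >= arr[i]): stack.pop(0)`
def pvPopWhileGE (stack : List Int) (x : Int) : List Int :=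
  match stack with
  | [] => []
  | s :: rest => if s ≥ x then pvPopWhileGE rest x else s :: rest

-- one iteration of A's for-loop: state = (vector, stack), x = arr[i]
def pvStepA (st : List Int × List Int) (x : Int) : List Int × List Int :=
  match st.2 with
  | [] => (st.1 ++ [-1], [] ++ [x])
  | s :: rest =>
    if s < x then (st.1 ++ [s], (s :: rest) ++ [x])
    else
      let stack' := pvPopWhileGE (s :: rest) x
      match stack' with
      | [] => (st.1 ++ [-1], [] ++ [x])
      | t :: r => (st.1 ++ [t], (t :: r) ++ [x])

def NearestSmallestElement (arr : List Int) : List Int :=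
  (arr.foldl pvStepA ([], [])).1

-- ===== PORT B =====
-- one iteration of B's loop: state = (res, m) with m : Option Int (None initially)
def pvStepB (st : List Int × Option Int) (x : Int) : List Int × Option Int :=
  let res := st.1 ++ [match st.2 with
                      | some m => if m < x then m else -1
                      | none => -1]
  let m' := match st.2 with
            | none => some x
            | some m => if x < m then some x else some m
  (res, m')

def NearestSmallestElement_alt (arr : List Int) : List Int :=
  (arr.foldl pvStepB ([], none)).1

-- ===== PRECONDITION & SPEC =====
def Spec_NearestSmallestElement (arr : List Int) (out : List Int) : Prop := out = NearestSmallestElement_alt arr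
instance (arr : List Int) (out : List Int) : Decidable (Spec_NearestSmallestElement arr out) := by unfold Spec_NearestSmallestElement; infer_instance

-- ===== CLAIM (what is proved, stated in full; the proofs are below) =====
def Claim_equal_NearestSmallestElement : Prop := ∀ (arr : List Int), Dom_NearestSmallestElement arr → Spec_NearestSmallestElement arr (NearestSmallestElement arr)

-- ===== LEMMAS AND PROOFS =====

lemma pvPopWhileGE_all_ge (rest : List Int) (x : Int) (h : ∀ y ∈ rest, x ≤ y) :
    pvPopWhileGE rest x = [] := by
  induction rest with
  | nil => rfl
  | cons a t ih =>
    have ha : x ≤ a := h a (by simp)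
    simp only [pvPopWhileGE, if_pos (by omega : a ≥ x)]
    exact ih (fun y hy => h y (by simp [hy]))

-- invariant: A's stack is m :: rest with every element ≥ m, B's state is (same res, some m)
lemma pv_main (arr : List Int) : ∀ (res : List Int) (m : Int) (rest : List Int),
    (∀ y ∈ rest, m ≤ y) →
    (arr.foldl pvStepA (res, m :: rest)).1 = (arr.foldl pvStepB (res, some m)).1 := by
  induction arr with
  | nil => intro res m rest _; rfl
  | cons x t ih =>
    intro res m rest h
    simp only [List.foldl]
    by_cases hx : m < x
    · have hA : pvStepA (res, m :: rest) x = (res ++ [m], (m :: rest) ++ [x]) := by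
        simp [pvStepA, hx]
      have hB : pvStepB (res, some m) x = (res ++ [m], some m) := by
        simp [pvStepB, hx, show ¬ x < m by omega]
      rw [hA, hB]
      have : (m :: rest) ++ [x] = m :: (rest ++ [x]) := by simp
      rw [this]
      exact ih (res ++ [m]) m (rest ++ [x])
        (by intro y hy; rcases List.mem_append.mp hy with h1 | h1
            · exact h y h1
            · simp at h1; omega)
    · -- x ≤ m: A pops the whole stack (all elements ≥ m ≥ x), outputs -1
      have hpop : pvPopWhileGE (m :: rest) x = [] := by
        apply pvPopWhileGE_all_ge
        intro y hy; rcases List.mem_cons.mp hy with h1 | h1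
        · omega
        · have := h y h1; omega
      have hA : pvStepA (res, m :: rest) x = (res ++ [-1], [x]) := by
        simp [pvStepA, if_neg hx, hpop]
      have hB : pvStepB (res, some m) x = (res ++ [-1], some x) := by
        by_cases hxm : x < m
        · simp [pvStepB, hx, hxm]
        · have : x = m := by omega
          simp [pvStepB, this]
      rw [hA, hB]
      exact ih (res ++ [-1]) x [] (by simp)

-- ===== VERDICT (by name: the statement is the Claim_ definition above) =====
theorem NearestSmallestElement_spec : Claim_equal_NearestSmallestElement := by
  intro arr _
  unfold Spec_NearestSmallestElement NearestSmallestElement NearestSmallestElement_alt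
  cases arr with
  | nil => rfl
  | cons x t =>
    simp only [List.foldl]
    have hA : pvStepA ([], []) x = ([-1], [x]) := by simp [pvStepA]
    have hB : pvStepB ([], (none : Option Int)) x = ([-1], some x) := by simp [pvStepB]
    rw [hA, hB]
    exact pv_main t [-1] x [] (by simp)
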